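-- pv_equiv track=rewrite | github.com/jjungeun/Algo_study | python/kakao/Solution22.py | solution
-- ===== SOURCE A (Python) =====
-- from itertools import combinations
-- import copy
--
-- dr = [-1, 0, 1, 0]
--
-- dc = [0, 1, 0, -1]
--
-- def do_infect(area, pos, N, M):
-- 	row, col = pos
-- 	for i in range(4):
-- 		new_row, new_col = row + dr[i], col + dc[i]
-- 		if new_row in range(0, N) and new_col in range(0, M) and area[new_row][new_col] == 0:
-- 			area[new_row][new_col] = 2
-- 			do_infect(area, [new_row, new_col], N, M)
--
-- def get_area(area, new_wall, infect, N, M):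
-- 	tmp_area = copy.deepcopy(area)
-- 	for wall in new_wall:
-- 		r, c = wall
-- 		tmp_area[r][c] = 1
-- 	for infect_pos in infect:
-- 		do_infect(tmp_area, infect_pos, N, M)
-- 	return sum([tmp_area[r].count(0) for r in range(N)])
--
-- def solution(area, N, M):
-- 	max_area = 0
-- 	pos = []
-- 	infect = []
-- 	for r in range(N):
-- 		for c in range(M):
-- 			if area[r][c] == 0:
-- 				pos.append([r,c])
-- 			elif area[r][c] == 2:
-- 				infect.append([r, c])
-- 	walls = list(combinations(pos, 3))
-- 	for new_wall in walls:
-- 		max_area = max(max_area, get_area(area, new_wall, infect, N, M))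
-- 	return max_area
-- ===== SOURCE B (Python) =====
-- from itertools import combinations
--
-- def _spread_count(area, walls, viruses, N, M):
--     grid = [row[:] for row in area]
--     for r, c in walls:
--         grid[r][c] = 1
--     stack = list(viruses)
--     while stack:
--         r, c = stack.pop()
--         for nr, nc in ((r - 1, c), (r, c + 1), (r + 1, c), (r, c - 1)):
--             if 0 <= nr < N and 0 <= nc < M and grid[nr][nc] == 0:
--                 grid[nr][nc] = 2
--                 stack.append((nr, nc))
--     return sum(row.count(0) for row in grid[:N])
--
-- def solution(area, N, M):
--     empties = [(r, c) for r in range(N) for c in range(M) if area[r][c] == 0]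
--     viruses = [(r, c) for r in range(N) for c in range(M) if area[r][c] == 2]
--     best = 0
--     for walls in combinations(empties, 3):
--         best = max(best, _spread_count(area, walls, viruses, N, M))
--     return best
-- ===== Notes on version B (the rewrite author's own statement) =====
-- stated objective: alternative
-- what changed: The recursive DFS do_infect plus helper trio is replaced by a single pass per candidate: an explicit iterative stack flood fill (pop a cell, mark and push zero neighbours) seeded with all virus cells, with the empty/virus collection done by comprehensions and the scoring inlined as a sum over the first N rows.
import Mathlib
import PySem

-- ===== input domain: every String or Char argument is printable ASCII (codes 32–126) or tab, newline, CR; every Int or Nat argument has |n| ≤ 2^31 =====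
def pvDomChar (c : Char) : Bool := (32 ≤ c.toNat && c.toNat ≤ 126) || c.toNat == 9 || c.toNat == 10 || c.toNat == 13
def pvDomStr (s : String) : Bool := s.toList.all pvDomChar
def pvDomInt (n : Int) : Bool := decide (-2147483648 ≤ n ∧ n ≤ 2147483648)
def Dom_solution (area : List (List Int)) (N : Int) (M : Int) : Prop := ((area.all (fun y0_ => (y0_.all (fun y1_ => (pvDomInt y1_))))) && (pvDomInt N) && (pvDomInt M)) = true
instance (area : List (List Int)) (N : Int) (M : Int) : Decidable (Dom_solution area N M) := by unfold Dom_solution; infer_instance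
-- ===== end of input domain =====

-- B replaces the recursive DFS spread plus helper trio by one iterative stack flood fill per
-- candidate wall triple, with comprehension-style collection and inlined scoring (objective:
-- alternative, same asymptotic cost).  Neither program mutates its arguments.

-- Shared indexing primitives for grid[r][c] reads/writes: every Python access in both programs
-- is guarded by 0 ≤ r < N ≤ len(grid) and 0 ≤ c < M ≤ len(grid[r]) (inside Pre_), where these
-- equal Python's indexing (no negative/wrapping index ever occurs).
def pvCell (g : List (List Int)) (r c : Int) : Int := (g.getD r.toNat []).getD c.toNat 0
def pvSet (g : List (List Int)) (r c : Int) (v : Int) : List (List Int) :=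
  g.set r.toNat ((g.getD r.toNat []).set c.toNat v)

-- ===== PORT A =====
def pvDr : List Int := [-1, 0, 1, 0]
def pvDc : List Int := [0, 1, 0, -1]

-- do_infect: recursive DFS over the four directions.  Python's recursion is unbounded; the fuel
-- argument only bounds the recursion depth and is always sufficient on admitted inputs
-- (depth ≤ #in-range zeros + 1 ≤ N*M + 1, the fuel passed by get_area's port).
def doInf (fuel : Nat) (g : List (List Int)) (row col N M : Int) (ds : List Nat) : List (List Int) :=
  match ds with
  | [] => g
  | i :: rest =>
    let nr := row + pvDr.getD i 0
    let nc := col + pvDc.getD i 0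
    if 0 ≤ nr ∧ nr < N ∧ 0 ≤ nc ∧ nc < M ∧ pvCell g nr nc = 0 then
      match fuel with
      | 0 => g
      | f + 1 => doInf (f + 1) (doInf f (pvSet g nr nc 2) nr nc N M [0, 1, 2, 3]) row col N M rest
    else doInf fuel g row col N M rest
termination_by (fuel, ds.length)
decreasing_by
  all_goals first
    | exact Prod.Lex.left _ _ (by omega)
    | exact Prod.Lex.right _ (by simp [List.length_cons])

-- the 'for infect_pos in infect: do_infect(...)' loop of get_area
def pvInfectAll (infect : List (Int × Int)) (g : List (List Int)) (N M : Int) : List (List Int) :=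
  infect.foldl (fun t p => doInf (N.toNat * M.toNat + 1) t p.1 p.2 N M [0, 1, 2, 3]) g

def getArea (area : List (List Int)) (newWall : List (Int × Int)) (infect : List (Int × Int))
    (N M : Int) : Int :=
  let tmp := area  -- copy.deepcopy: identity on pure values
  let tmp := newWall.foldl (fun t w => pvSet t w.1 w.2 1) tmp
  let tmp := pvInfectAll infect tmp N M
  (PySem.List.pyRange 0 N 1).foldl (fun s r => s + (PySem.List.count (tmp.getD r.toNat []) 0 : Int)) 0

def solution (area : List (List Int)) (N : Int) (M : Int) : Int :=
  let pi := (PySem.List.pyRange 0 N 1).foldl (fun pi r =>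
      (PySem.List.pyRange 0 M 1).foldl
        (fun (pi : List (Int × Int) × List (Int × Int)) c =>
          if pvCell area r c = 0 then (pi.1 ++ [(r, c)], pi.2)
          else if pvCell area r c = 2 then (pi.1, pi.2 ++ [(r, c)]) else pi) pi)
      (([], []) : List (Int × Int) × List (Int × Int))
  let walls := PySem.List.combinations pi.1 3
  walls.foldl (fun m w => max m (getArea area w pi.2 N M)) 0

-- ===== PORT B =====
def pvDirs : List (Int × Int) := [(-1, 0), (0, 1), (1, 0), (0, -1)]

-- the inner for-loop of the while body: try the four neighbours, marking and pushing zero cells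
def pushNbrs (g : List (List Int)) (st : List (Int × Int)) (r c N M : Int) :
    List (Int × Int) → List (List Int) × List (Int × Int)
  | [] => (g, st)
  | d :: ds =>
    let nr := r + d.1
    let nc := c + d.2
    if 0 ≤ nr ∧ nr < N ∧ 0 ≤ nc ∧ nc < M ∧ pvCell g nr nc = 0 then
      pushNbrs (pvSet g nr nc 2) ((nr, nc) :: st) r c N M ds
    else pushNbrs g st r c N M ds

-- 'while stack:' — the Lean list head is the Python list end (pop()/append work at the end), so
-- the initial stack is the virus list reversed.  Fuel only bounds the iteration count and is
-- always sufficient (each iteration pops one entry; a push marks an in-range zero).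
def bloop : Nat → List (List Int) → List (Int × Int) → Int → Int → List (List Int)
  | 0, g, _, _, _ => g
  | _ + 1, g, [], _, _ => g
  | f + 1, g, p :: st, N, M =>
    let gs := pushNbrs g st p.1 p.2 N M pvDirs
    bloop f gs.1 gs.2 N M

def spreadCount (area : List (List Int)) (walls : List (Int × Int)) (viruses : List (Int × Int))
    (N M : Int) : Int :=
  let grid := walls.foldl (fun t w => pvSet t w.1 w.2 1) area  -- [row[:] for row in area] + wall writes
  let grid := bloop (5 * (N.toNat * M.toNat) + viruses.length + 1) grid viruses.reverse N M
  ((grid.take N.toNat).map (fun row => (PySem.List.count row 0 : Int))).sum  -- grid[:N]; only reached with N > 0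

def solution_alt (area : List (List Int)) (N : Int) (M : Int) : Int :=
  let empties := (PySem.List.pyRange 0 N 1).flatMap (fun r =>
      ((PySem.List.pyRange 0 M 1).filter (fun c => pvCell area r c = 0)).map (fun c => ((r, c) : Int × Int)))
  let viruses := (PySem.List.pyRange 0 N 1).flatMap (fun r =>
      ((PySem.List.pyRange 0 M 1).filter (fun c => pvCell area r c = 2)).map (fun c => ((r, c) : Int × Int)))
  (PySem.List.combinations empties 3).foldl (fun b w => max b (spreadCount area w viruses N M)) 0

-- ===== PRECONDITION & SPEC =====
-- Pre_ excludes exactly the inputs where A raises IndexError: a positive N exceeding the number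
-- of rows, or one of the first N rows shorter than a positive M.
def Pre_solution (area : List (List Int)) (N : Int) (M : Int) : Prop :=
  N ≤ 0 ∨ M ≤ 0 ∨ (N ≤ (area.length : Int) ∧ ∀ row ∈ area.take N.toNat, M ≤ (row.length : Int))
instance (area : List (List Int)) (N : Int) (M : Int) : Decidable (Pre_solution area N M) := by
  unfold Pre_solution; infer_instance

def pvWitness_solution : List (List Int) × Int × Int := ([[2, 0], [0, 0]], 2, 2)

def Spec_solution (area : List (List Int)) (N : Int) (M : Int) (out : Int) : Prop := out = solution_alt area N M
instance (area : List (List Int)) (N : Int) (M : Int) (out : Int) : Decidable (Spec_solution area N M out) := by unfold Spec_solution; infer_instance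

-- ===== CLAIM (what is proved, stated in full; the proofs are below) =====
def Claim_equal_solution : Prop := ∀ (area : List (List Int)) (N : Int) (M : Int), Dom_solution area N M → Pre_solution area N M → Spec_solution area N M (solution area N M)

-- ===== LEMMAS AND PROOFS =====

-- Both spreads are proved equal through a common characterisation: each returns the unique
-- saturated marking extension of the walled grid whose marked cells are reachable from a virus.

def cellN (g : List (List Int)) (i j : Nat) : Int := (g.getD i []).getD j 0

def InRN (N M : Int) (i j : Nat) : Prop := (i : Int) < N ∧ (j : Int) < M

def AdjN (N M : Int) (i j i' j' : Nat) : Prop :=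
  InRN N M i' j' ∧ ∃ k, k < 4 ∧ (i' : Int) = (i : Int) + pvDr.getD k 0 ∧ (j' : Int) = (j : Int) + pvDc.getD k 0

inductive ReachN (h : List (List Int)) (N M : Int) : Nat → Nat → Prop
  | base (i j : Nat) : InRN N M i j → cellN h i j = 2 → ReachN h N M i j
  | step (i j i' j' : Nat) : ReachN h N M i j → AdjN N M i j i' j' → cellN h i' j' = 0 → ReachN h N M i' j'

def ShapeEq (g g' : List (List Int)) : Prop :=
  g'.length = g.length ∧ ∀ i : Nat, ((g'.getD i []).length = (g.getD i []).length)

def MExt (h : List (List Int)) (N M : Int) (g g' : List (List Int)) : Prop :=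
  ShapeEq g g' ∧ ∀ i j : Nat, cellN g' i j = cellN g i j ∨
    (InRN N M i j ∧ cellN g i j = 0 ∧ cellN g' i j = 2 ∧ ReachN h N M i j)

def NoZ (N M : Int) (g : List (List Int)) (i j : Nat) : Prop :=
  ∀ i' j', AdjN N M i j i' j' → cellN g i' j' ≠ 0

def SatN (g : List (List Int)) (N M : Int) : Prop :=
  ∀ i j, InRN N M i j → cellN g i j = 2 → NoZ N M g i j

def GoodG (g : List (List Int)) (N M : Int) : Prop :=
  N ≤ (g.length : Int) ∧ ∀ i : Nat, (i : Int) < N → M ≤ ((g.getD i []).length : Int)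

def cellsNM (N M : Int) : List (Nat × Nat) := List.range N.toNat ×ˢ List.range M.toNat

def zerosN (g : List (List Int)) (N M : Int) : Nat :=
  (cellsNM N M).countP (fun p => cellN g p.1 p.2 == 0)

-- ---- set/shape basics ----
lemma length_pvSet (g : List (List Int)) (r c v : Int) : (pvSet g r c v).length = g.length := by
  simp [pvSet]

lemma getD_pvSet_ne (g : List (List Int)) (r c v : Int) (i : Nat) (hi : i ≠ r.toNat) :
    (pvSet g r c v).getD i [] = g.getD i [] := by
  simp only [pvSet, List.getD_eq_getElem?_getD, List.getElem?_set_ne (Ne.symm hi)]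

lemma getD_pvSet_self (g : List (List Int)) (r c v : Int) (hr : r.toNat < g.length) :
    (pvSet g r c v).getD r.toNat [] = (g.getD r.toNat []).set c.toNat v := by
  simp only [pvSet, List.getD_eq_getElem?_getD, List.getElem?_set_self hr, Option.getD_some]

lemma rowlen_pvSet (g : List (List Int)) (r c v : Int) (i : Nat) :
    ((pvSet g r c v).getD i []).length = (g.getD i []).length := by
  by_cases hi : i = r.toNat
  · rw [hi]
    by_cases hr : r.toNat < g.length
    · rw [getD_pvSet_self g r c v hr]; simp
    · have h1 : (pvSet g r c v).length = g.length := length_pvSet g r c v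
      rw [List.getD_eq_default _ _ (by omega), List.getD_eq_default _ _ (by omega)]
  · rw [getD_pvSet_ne g r c v i hi]

lemma shapeEq_pvSet (g : List (List Int)) (r c v : Int) : ShapeEq g (pvSet g r c v) :=
  ⟨length_pvSet g r c v, fun i => rowlen_pvSet g r c v i⟩

lemma cellN_pvSet_self (g : List (List Int)) (r c v : Int) (hr : r.toNat < g.length)
    (hc : c.toNat < (g.getD r.toNat []).length) :
    cellN (pvSet g r c v) r.toNat c.toNat = v := by
  simp only [cellN]
  rw [getD_pvSet_self g r c v hr]
  have hlen : c.toNat < ((g.getD r.toNat []).set c.toNat v).length := by simpa using hc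
  rw [List.getD_eq_getElem _ _ hlen]
  simp [List.getElem_set]

lemma cellN_pvSet_ne (g : List (List Int)) (r c v : Int) (i j : Nat)
    (hne : i ≠ r.toNat ∨ j ≠ c.toNat) :
    cellN (pvSet g r c v) i j = cellN g i j := by
  rcases hne with h | h
  · simp only [cellN, getD_pvSet_ne g r c v i h]
  · by_cases hi : i = r.toNat
    · rw [hi]
      by_cases hr : r.toNat < g.length
      · simp only [cellN]
        rw [getD_pvSet_self g r c v hr]
        simp only [List.getD_eq_getElem?_getD, List.getElem?_set_ne (Ne.symm h)]
      · simp only [cellN]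
        have h1 : (pvSet g r c v).length = g.length := length_pvSet g r c v
        rw [List.getD_eq_default (pvSet g r c v) [] (by omega),
          List.getD_eq_default g [] (by omega)]
    · simp only [cellN, getD_pvSet_ne g r c v i hi]

lemma shapeEq_trans {a b c : List (List Int)} (h1 : ShapeEq a b) (h2 : ShapeEq b c) :
    ShapeEq a c := ⟨h2.1.trans h1.1, fun i => (h2.2 i).trans (h1.2 i)⟩

lemma goodG_shape {g g' : List (List Int)} {N M : Int} (hG : GoodG g N M)
    (hs : ShapeEq g g') : GoodG g' N M := by
  refine ⟨by rw [hs.1]; exact hG.1, fun i hi => ?_⟩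
  rw [hs.2 i]; exact hG.2 i hi

-- ---- marking extensions ----
lemma mExt_refl (h : List (List Int)) (N M : Int) (g : List (List Int)) : MExt h N M g g :=
  ⟨⟨rfl, fun _ => rfl⟩, fun _ _ => Or.inl rfl⟩

lemma mExt_pres {h a b : List (List Int)} {N M : Int} (he : MExt h N M a b) {i j : Nat}
    (hnz : cellN a i j ≠ 0) : cellN b i j = cellN a i j := by
  rcases he.2 i j with h1 | h1
  · exact h1
  · exact absurd h1.2.1 hnz

lemma mExt_two {h a b : List (List Int)} {N M : Int} (he : MExt h N M a b) {i j : Nat}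
    (h2 : cellN a i j = 2) : cellN b i j = 2 := by
  rw [mExt_pres he (by rw [h2]; norm_num)]; exact h2

lemma mExt_trans {h a b c : List (List Int)} {N M : Int} (h1 : MExt h N M a b)
    (h2 : MExt h N M b c) : MExt h N M a c := by
  refine ⟨⟨h2.1.1.trans h1.1.1, fun i => (h2.1.2 i).trans (h1.1.2 i)⟩, fun i j => ?_⟩
  rcases h2.2 i j with hc | hc
  · rcases h1.2 i j with hb | hb
    · exact Or.inl (hc.trans hb)
    · exact Or.inr ⟨hb.1, hb.2.1, hc.trans hb.2.2.1, hb.2.2.2⟩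
  · rcases h1.2 i j with hb | hb
    · exact Or.inr ⟨hc.1, hb.symm.trans hc.2.1, hc.2.2.1, hc.2.2.2⟩
    · rw [hb.2.2.1] at hc; exact absurd hc.2.1 (by norm_num)

lemma mExt_mark {h g : List (List Int)} {N M : Int} {r c : Int} (hG : GoodG g N M)
    (h0r : 0 ≤ r) (hrN : r < N) (h0c : 0 ≤ c) (hcM : c < M)
    (h0 : cellN g r.toNat c.toNat = 0) (hre : ReachN h N M r.toNat c.toNat) :
    MExt h N M g (pvSet g r c 2) := by
  have hr : r.toNat < g.length := by have := hG.1; omega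
  have hc2 : c.toNat < (g.getD r.toNat []).length := by
    have := hG.2 r.toNat (by omega); omega
  refine ⟨shapeEq_pvSet g r c 2, fun i j => ?_⟩
  by_cases hij : i = r.toNat ∧ j = c.toNat
  · rcases hij with ⟨hi, hj⟩; subst hi; subst hj
    exact Or.inr ⟨⟨by omega, by omega⟩, h0, cellN_pvSet_self g r c 2 hr hc2, hre⟩
  · exact Or.inl (cellN_pvSet_ne g r c 2 i j (by tauto))

lemma noZ_mono {h a b : List (List Int)} {N M : Int} (he : MExt h N M a b) {i j : Nat}
    (hn : NoZ N M a i j) : NoZ N M b i j := by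
  intro i' j' hadj hz
  rcases he.2 i' j' with h1 | h1
  · exact hn i' j' hadj (h1.symm.trans hz)
  · rw [h1.2.2.1] at hz; exact absurd hz (by norm_num)

-- ---- zero counting ----
lemma mem_cellsNM {N M : Int} {p : Nat × Nat} :
    p ∈ cellsNM N M ↔ p.1 < N.toNat ∧ p.2 < M.toNat := by
  cases p; simp [cellsNM, List.mem_product, List.mem_range]

lemma nodup_cellsNM (N M : Int) : (cellsNM N M).Nodup :=
  List.Nodup.product List.nodup_range List.nodup_range

lemma zerosN_le (g : List (List Int)) (N M : Int) : zerosN g N M ≤ N.toNat * M.toNat := by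
  calc zerosN g N M ≤ (cellsNM N M).length := List.countP_le_length
    _ = N.toNat * M.toNat := by simp [cellsNM, List.length_product]

lemma zerosN_mono {h g g' : List (List Int)} {N M : Int} (he : MExt h N M g g') :
    zerosN g' N M ≤ zerosN g N M := by
  apply List.countP_mono_left
  intro p _ hp
  rcases he.2 p.1 p.2 with h1 | h1
  · simpa [h1] using hp
  · exfalso; revert hp; simp [h1.2.2.1]

lemma zerosN_lt_mark {g : List (List Int)} {N M : Int} {r c : Int} (hG : GoodG g N M)
    (h0r : 0 ≤ r) (hrN : r < N) (h0c : 0 ≤ c) (hcM : c < M)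
    (h0 : cellN g r.toNat c.toNat = 0) :
    zerosN (pvSet g r c 2) N M < zerosN g N M := by
  have hr : r.toNat < g.length := by have := hG.1; omega
  have hc2 : c.toNat < (g.getD r.toNat []).length := by
    have := hG.2 r.toNat (by omega); omega
  have hmem : ((r.toNat, c.toNat) : Nat × Nat) ∈ cellsNM N M := by
    rw [mem_cellsNM]; exact ⟨by simp; omega, by simp; omega⟩
  obtain ⟨l1, l2, hsplit⟩ := List.append_of_mem hmem
  have hnd : (l1 ++ (r.toNat, c.toNat) :: l2).Nodup := by
    rw [← hsplit]; exact nodup_cellsNM N M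
  have hdisj := List.disjoint_of_nodup_append hnd
  have hn1 : ((r.toNat, c.toNat) : Nat × Nat) ∉ l1 := fun hm => hdisj hm (by simp)
  have hn2 : ((r.toNat, c.toNat) : Nat × Nat) ∉ l2 := by
    have h2 := List.Nodup.of_append_right hnd
    exact (List.nodup_cons.mp h2).1
  have hsame : ∀ (l : List (Nat × Nat)), ((r.toNat, c.toNat) : Nat × Nat) ∉ l →
      l.countP (fun p => cellN (pvSet g r c 2) p.1 p.2 == 0) =
      l.countP (fun p => cellN g p.1 p.2 == 0) := by
    intro l hl
    apply List.countP_congr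
    intro x hx
    have hxne : x.1 ≠ r.toNat ∨ x.2 ≠ c.toNat := by
      by_contra hcon
      push_neg at hcon
      exact hl (by
        have : x = (r.toNat, c.toNat) := by
          cases x; simp at hcon ⊢; exact ⟨hcon.1, hcon.2⟩
        rwa [this] at hx)
    simp [cellN_pvSet_ne g r c 2 x.1 x.2 hxne]
  unfold zerosN
  rw [hsplit, List.countP_append, List.countP_append, List.countP_cons, List.countP_cons,
    hsame l1 hn1, hsame l2 hn2]
  have h2 : cellN (pvSet g r c 2) r.toNat c.toNat = 2 := cellN_pvSet_self g r c 2 hr hc2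
  simp [h2, h0]

-- ---- reachability and uniqueness ----
lemma reachN_inR {h : List (List Int)} {N M : Int} {i j : Nat} (hr : ReachN h N M i j) :
    InRN N M i j := by
  induction hr with
  | base i j h1 _ => exact h1
  | step i j i' j' _ hadj _ _ => exact hadj.1

lemma reach_marked {h g : List (List Int)} {N M : Int} (he : MExt h N M h g)
    (hs : SatN g N M) {i j : Nat} (hr : ReachN h N M i j) : cellN g i j = 2 := by
  induction hr with
  | base i j h1 h2 => exact mExt_two he h2
  | step i j i' j' hre hadj hz ih =>
    rcases he.2 i' j' with h1 | h1
    · exact absurd (h1.trans hz) (hs i j (reachN_inR hre) ih i' j' hadj)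
    · exact h1.2.2.1

lemma eq_of_shape_cell {g1 g2 : List (List Int)} (hl : g1.length = g2.length)
    (hrow : ∀ i : Nat, (g1.getD i []).length = (g2.getD i []).length)
    (hc : ∀ i j, cellN g1 i j = cellN g2 i j) : g1 = g2 := by
  apply List.ext_getElem hl
  intro i hi1 hi2
  have hrl : g1[i].length = g2[i].length := by
    have := hrow i
    rwa [List.getD_eq_getElem _ _ hi1, List.getD_eq_getElem _ _ hi2] at this
  apply List.ext_getElem hrl
  intro j hj1 hj2
  have := hc i j
  simp only [cellN] at this
  rwa [List.getD_eq_getElem _ _ hi1, List.getD_eq_getElem _ _ hi2,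
    List.getD_eq_getElem _ _ hj1, List.getD_eq_getElem _ _ hj2] at this

lemma grid_unique {h g1 g2 : List (List Int)} {N M : Int}
    (h1 : MExt h N M h g1) (hs1 : SatN g1 N M)
    (h2 : MExt h N M h g2) (hs2 : SatN g2 N M) : g1 = g2 := by
  apply eq_of_shape_cell (by rw [h1.1.1, h2.1.1]) (fun i => by rw [h1.1.2 i, h2.1.2 i])
  intro i j
  rcases h1.2 i j with ha | ha <;> rcases h2.2 i j with hb | hb
  · rw [ha, hb]
  · exact (reach_marked h1 hs1 hb.2.2.2).trans hb.2.2.1.symm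
  · exact ha.2.2.1.trans (reach_marked h2 hs2 ha.2.2.2).symm
  · rw [ha.2.2.1, hb.2.2.1]

-- a guarded marking step starting from a reachable source is reachable
lemma reach_step_guard {h g : List (List Int)} {N M : Int} (hE : MExt h N M h g)
    {r c nr nc : Int} {k : Nat}
    (hre : ReachN h N M r.toNat c.toNat) (h0r : 0 ≤ r) (h0c : 0 ≤ c) (hk : k < 4)
    (hnr : nr = r + pvDr.getD k 0) (hnc : nc = c + pvDc.getD k 0)
    (hg1 : 0 ≤ nr) (hg2 : nr < N) (hg3 : 0 ≤ nc) (hg4 : nc < M)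
    (hz : cellN g nr.toNat nc.toNat = 0) :
    ReachN h N M nr.toNat nc.toNat := by
  have hzh : cellN h nr.toNat nc.toNat = 0 := by
    rcases hE.2 nr.toNat nc.toNat with h1 | h1
    · rw [← h1]; exact hz
    · exact h1.2.1
  refine ReachN.step r.toNat c.toNat nr.toNat nc.toNat hre ⟨⟨by omega, by omega⟩, k, hk, ?_, ?_⟩ hzh
  · rw [Int.toNat_of_nonneg hg1, Int.toNat_of_nonneg h0r]; exact hnr
  · rw [Int.toNat_of_nonneg hg3, Int.toNat_of_nonneg h0c]; exact hnc

-- all four guarded neighbours non-zero ⇒ no zero neighbour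
lemma noZ_of_dead {g : List (List Int)} {N M : Int} {r c : Int} (h0r : 0 ≤ r) (h0c : 0 ≤ c)
    (hdead : ∀ k : Nat, k < 4 → ∀ nr nc : Int, nr = r + pvDr.getD k 0 → nc = c + pvDc.getD k 0 →
      0 ≤ nr → nr < N → 0 ≤ nc → nc < M → cellN g nr.toNat nc.toNat ≠ 0) :
    NoZ N M g r.toNat c.toNat := by
  intro i' j' hadj hz
  obtain ⟨⟨hiN, hjM⟩, k, hk, hei, hej⟩ := hadj
  rw [Int.toNat_of_nonneg h0r] at hei
  rw [Int.toNat_of_nonneg h0c] at hej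
  refine hdead k hk (i' : Int) (j' : Int) hei hej (Int.natCast_nonneg i') hiN (Int.natCast_nonneg j') hjM ?_
  simpa using hz

-- ---- the DFS of port A saturates ----
lemma doInf_spec {h : List (List Int)} {N M : Int} :
    ∀ (fuel : Nat) (ds : List Nat) (g : List (List Int)) (r c : Int),
    (∀ x ∈ ds, x < 4) → GoodG g N M → MExt h N M h g →
    ReachN h N M r.toNat c.toNat → 0 ≤ r → 0 ≤ c →
    zerosN g N M + 1 ≤ fuel →
    MExt h N M g (doInf fuel g r c N M ds) ∧
    (∀ x ∈ ds, ∀ nr nc : Int, nr = r + pvDr.getD x 0 → nc = c + pvDc.getD x 0 →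
      0 ≤ nr → nr < N → 0 ≤ nc → nc < M →
      cellN (doInf fuel g r c N M ds) nr.toNat nc.toNat ≠ 0) ∧
    (∀ i j, cellN (doInf fuel g r c N M ds) i j = 2 →
      cellN g i j = 2 ∨ NoZ N M (doInf fuel g r c N M ds) i j) := by
  intro fuel
  induction fuel using Nat.strong_induction_on with
  | _ fuel IHf =>
    intro ds
    induction ds with
    | nil =>
      intro g r c _ hG hE hre h0r h0c hfuel
      rw [doInf]
      exact ⟨mExt_refl h N M g, by simp, fun i j h2 => Or.inl h2⟩
    | cons i rest IH =>
      intro g r c hds hG hE hre h0r h0c hfuel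
      obtain ⟨f, rfl⟩ : ∃ f, fuel = f + 1 := ⟨fuel - 1, by omega⟩
      have hi4 : i < 4 := hds i (by simp)
      by_cases hguard : 0 ≤ r + pvDr.getD i 0 ∧ r + pvDr.getD i 0 < N ∧
          0 ≤ c + pvDc.getD i 0 ∧ c + pvDc.getD i 0 < M ∧
          pvCell g (r + pvDr.getD i 0) (c + pvDc.getD i 0) = 0
      · obtain ⟨hg1, hg2, hg3, hg4, hg5⟩ := hguard
        have hg5' : cellN g (r + pvDr.getD i 0).toNat (c + pvDc.getD i 0).toNat = 0 := hg5
        have hreC : ReachN h N M (r + pvDr.getD i 0).toNat (c + pvDc.getD i 0).toNat :=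
          reach_step_guard hE hre h0r h0c hi4 rfl rfl hg1 hg2 hg3 hg4 hg5'
        have hmark := mExt_mark (h := h) hG hg1 hg2 hg3 hg4 hg5' hreC
        have hzlt := zerosN_lt_mark hG hg1 hg2 hg3 hg4 hg5'
        have hchild := IHf f (by omega) [0, 1, 2, 3]
          (pvSet g (r + pvDr.getD i 0) (c + pvDc.getD i 0) 2)
          (r + pvDr.getD i 0) (c + pvDc.getD i 0)
          (by decide)
          (goodG_shape hG (shapeEq_pvSet g _ _ 2))
          (mExt_trans hE hmark) hreC hg1 hg3 (by omega)
        obtain ⟨hC1, hC2, hC3⟩ := hchild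
        have hzC : zerosN (doInf f (pvSet g (r + pvDr.getD i 0) (c + pvDc.getD i 0) 2)
            (r + pvDr.getD i 0) (c + pvDc.getD i 0) N M [0, 1, 2, 3]) N M ≤
            zerosN (pvSet g (r + pvDr.getD i 0) (c + pvDc.getD i 0) 2) N M := zerosN_mono hC1
        have hrest := IH (doInf f (pvSet g (r + pvDr.getD i 0) (c + pvDc.getD i 0) 2)
            (r + pvDr.getD i 0) (c + pvDc.getD i 0) N M [0, 1, 2, 3]) r c
          (fun x hx => hds x (by simp [hx]))
          (goodG_shape (goodG_shape hG (shapeEq_pvSet g _ _ 2)) hC1.1)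
          (mExt_trans (mExt_trans hE hmark) hC1) hre h0r h0c (by omega)
        obtain ⟨hR1, hR2, hR3⟩ := hrest
        have hunf : doInf (f + 1) g r c N M (i :: rest) =
            doInf (f + 1) (doInf f (pvSet g (r + pvDr.getD i 0) (c + pvDc.getD i 0) 2)
              (r + pvDr.getD i 0) (c + pvDc.getD i 0) N M [0, 1, 2, 3]) r c N M rest := by
          rw [doInf]
          rw [if_pos ⟨hg1, hg2, hg3, hg4, hg5⟩]
        rw [hunf]
        refine ⟨mExt_trans (mExt_trans hmark hC1) hR1, ?_, ?_⟩
        · intro x hx nr nc hnr hnc hb1 hb2 hb3 hb4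
          rcases List.mem_cons.mp hx with hxi | hxr
          · subst hxi
            have hset2 : cellN (pvSet g (r + pvDr.getD x 0) (c + pvDc.getD x 0) 2)
                (r + pvDr.getD x 0).toNat (c + pvDc.getD x 0).toNat = 2 := by
              have hr' : (r + pvDr.getD x 0).toNat < g.length := by have := hG.1; omega
              have hc' : (c + pvDc.getD x 0).toNat <
                  (g.getD (r + pvDr.getD x 0).toNat []).length := by
                have := hG.2 (r + pvDr.getD x 0).toNat (by omega); omega
              exact cellN_pvSet_self g _ _ 2 hr' hc'
            have h2fin : cellN (doInf (f + 1) (doInf f (pvSet g (r + pvDr.getD x 0)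
                (c + pvDc.getD x 0) 2) (r + pvDr.getD x 0) (c + pvDc.getD x 0) N M [0, 1, 2, 3])
                r c N M rest) (r + pvDr.getD x 0).toNat (c + pvDc.getD x 0).toNat = 2 :=
              mExt_two hR1 (mExt_two hC1 hset2)
            subst hnr; subst hnc
            intro hzero
            rw [h2fin] at hzero
            norm_num at hzero
          · exact hR2 x hxr nr nc hnr hnc hb1 hb2 hb3 hb4
        · intro i' j' h2
          rcases hR3 i' j' h2 with h2C | hnoz
          · rcases hC3 i' j' h2C with h2S | hnozC
            · by_cases hij : i' = (r + pvDr.getD i 0).toNat ∧ j' = (c + pvDc.getD i 0).toNat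
              · right
                rcases hij with ⟨rfl, rfl⟩
                have hnozg : NoZ N M (doInf (f + 1) (doInf f (pvSet g (r + pvDr.getD i 0)
                    (c + pvDc.getD i 0) 2) (r + pvDr.getD i 0) (c + pvDc.getD i 0) N M
                    [0, 1, 2, 3]) r c N M rest) (r + pvDr.getD i 0).toNat
                    (c + pvDc.getD i 0).toNat := by
                  apply noZ_of_dead hg1 hg3
                  intro k hk nr nc hnr hnc hb1 hb2 hb3 hb4
                  have hmem4 : k ∈ ([0, 1, 2, 3] : List Nat) := by
                    interval_cases k <;> simp
                  have := hC2 k hmem4 nr nc hnr hnc hb1 hb2 hb3 hb4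
                  intro hzero
                  exact this (by
                    have := mExt_pres hR1 (i := nr.toNat) (j := nc.toNat)
                    by_cases hz2 : cellN (doInf f (pvSet g (r + pvDr.getD i 0)
                        (c + pvDc.getD i 0) 2) (r + pvDr.getD i 0) (c + pvDc.getD i 0) N M
                        [0, 1, 2, 3]) nr.toNat nc.toNat = 0
                    · exact hz2
                    · exact absurd (this hz2 ▸ hzero) hz2)
                exact hnozg
              · left
                have : cellN (pvSet g (r + pvDr.getD i 0) (c + pvDc.getD i 0) 2) i' j' =
                    cellN g i' j' := by
                  apply cellN_pvSet_ne
                  tauto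
                rw [← this]; exact h2S
            · exact Or.inr (noZ_mono hR1 hnozC)
          · exact Or.inr hnoz
      · have hunf : doInf (f + 1) g r c N M (i :: rest) = doInf (f + 1) g r c N M rest := by
          rw [doInf, if_neg hguard]
        rw [hunf]
        have hrest := IH g r c (fun x hx => hds x (by simp [hx])) hG hE hre h0r h0c hfuel
        obtain ⟨hR1, hR2, hR3⟩ := hrest
        refine ⟨hR1, ?_, hR3⟩
        intro x hx nr nc hnr hnc hb1 hb2 hb3 hb4
        rcases List.mem_cons.mp hx with hxi | hxr
        · subst hxi
          push_neg at hguard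
          have hnz : cellN g nr.toNat nc.toNat ≠ 0 := by
            have := hguard (hnr ▸ hb1) (hnr ▸ hb2) (hnc ▸ hb3) (hnc ▸ hb4)
            rw [hnr, hnc]
            exact this
          intro hzero
          exact hnz (by
            by_cases hz2 : cellN g nr.toNat nc.toNat = 0
            · exact hz2
            · exact absurd ((mExt_pres hR1 hz2) ▸ hzero) hz2)
        · exact hR2 x hxr nr nc hnr hnc hb1 hb2 hb3 hb4

lemma infectAll_spec {h : List (List Int)} {N M : Int} :
    ∀ (seeds : List (Int × Int)) (g : List (List Int)),
    GoodG g N M → MExt h N M h g →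
    (∀ p ∈ seeds, 0 ≤ p.1 ∧ 0 ≤ p.2 ∧ ReachN h N M p.1.toNat p.2.toNat) →
    (∀ i j, InRN N M i j → cellN g i j = 2 →
      (∃ p ∈ seeds, p.1.toNat = i ∧ p.2.toNat = j) ∨ NoZ N M g i j) →
    MExt h N M h (pvInfectAll seeds g N M) ∧ SatN (pvInfectAll seeds g N M) N M := by
  intro seeds
  induction seeds with
  | nil =>
    intro g hG hE _ hsat
    refine ⟨hE, fun i j hin h2 => ?_⟩
    rcases hsat i j hin h2 with ⟨p, hp, _⟩ | hnoz
    · simp at hp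
    · exact hnoz
  | cons s rest IH =>
    intro g hG hE hseeds hsat
    obtain ⟨hs1, hs2, hs3⟩ := hseeds s (by simp)
    have hfuel : zerosN g N M + 1 ≤ N.toNat * M.toNat + 1 := by
      have := zerosN_le g N M; omega
    obtain ⟨hD1, hD2, hD3⟩ := doInf_spec (N.toNat * M.toNat + 1) [0, 1, 2, 3] g s.1 s.2
      (by decide) hG hE hs3 hs1 hs2 hfuel
    have hstep : pvInfectAll (s :: rest) g N M =
        pvInfectAll rest (doInf (N.toNat * M.toNat + 1) g s.1 s.2 N M [0, 1, 2, 3]) N M := by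
      simp [pvInfectAll]
    rw [hstep]
    apply IH
    · exact goodG_shape hG hD1.1
    · exact mExt_trans hE hD1
    · exact fun p hp => hseeds p (by simp [hp])
    · intro i j hin h2
      rcases hD3 i j h2 with h2g | hnoz
      · rcases hsat i j hin h2g with ⟨p, hp, hpc⟩ | hnozg
        · rcases List.mem_cons.mp hp with rfl | hpr
          · right
            rcases hpc with ⟨rfl, rfl⟩
            apply noZ_of_dead hs1 hs2
            intro k hk nr nc hnr hnc hb1 hb2 hb3 hb4
            have hmem4 : k ∈ ([0, 1, 2, 3] : List Nat) := by
              interval_cases k <;> simp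
            exact hD2 k hmem4 nr nc hnr hnc hb1 hb2 hb3 hb4
          · exact Or.inl ⟨p, hpr, hpc⟩
        · exact Or.inr (noZ_mono hD1 hnozg)
      · exact Or.inr hnoz

-- ---- the stack flood fill of port B saturates ----
lemma pushNbrs_spec {h : List (List Int)} {N M : Int} :
    ∀ (ds : List (Int × Int)) (g : List (List Int)) (st : List (Int × Int)) (r c : Int),
    (∀ d ∈ ds, ∃ k, k < 4 ∧ d.1 = pvDr.getD k 0 ∧ d.2 = pvDc.getD k 0) →
    GoodG g N M → MExt h N M h g →
    ReachN h N M r.toNat c.toNat → 0 ≤ r → 0 ≤ c →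
    MExt h N M g (pushNbrs g st r c N M ds).1 ∧
    (∀ d ∈ ds, ∀ nr nc : Int, nr = r + d.1 → nc = c + d.2 →
      0 ≤ nr → nr < N → 0 ≤ nc → nc < M →
      cellN (pushNbrs g st r c N M ds).1 nr.toNat nc.toNat ≠ 0) ∧
    (∀ p ∈ st, p ∈ (pushNbrs g st r c N M ds).2) ∧
    (∀ p ∈ (pushNbrs g st r c N M ds).2, p ∈ st ∨
      (0 ≤ p.1 ∧ 0 ≤ p.2 ∧ ReachN h N M p.1.toNat p.2.toNat)) ∧
    (∀ i j, cellN (pushNbrs g st r c N M ds).1 i j = 2 → cellN g i j = 2 ∨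
      ∃ p ∈ (pushNbrs g st r c N M ds).2, p.1.toNat = i ∧ p.2.toNat = j) ∧
    5 * zerosN (pushNbrs g st r c N M ds).1 N M + (pushNbrs g st r c N M ds).2.length ≤
      5 * zerosN g N M + st.length := by
  intro ds
  induction ds with
  | nil =>
    intro g st r c _ hG hE hre h0r h0c
    rw [pushNbrs]
    exact ⟨mExt_refl h N M g, by simp, fun p hp => hp, fun p hp => Or.inl hp,
      fun i j h2 => Or.inl h2, by simp⟩
  | cons d rest IH =>
    intro g st r c hds hG hE hre h0r h0c
    obtain ⟨k, hk, hd1, hd2⟩ := hds d (by simp)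
    by_cases hguard : 0 ≤ r + d.1 ∧ r + d.1 < N ∧ 0 ≤ c + d.2 ∧ c + d.2 < M ∧
        pvCell g (r + d.1) (c + d.2) = 0
    · obtain ⟨hg1, hg2, hg3, hg4, hg5⟩ := hguard
      have hg5' : cellN g (r + d.1).toNat (c + d.2).toNat = 0 := hg5
      have hreC : ReachN h N M (r + d.1).toNat (c + d.2).toNat :=
        reach_step_guard hE hre h0r h0c hk (by rw [hd1]) (by rw [hd2]) hg1 hg2 hg3 hg4 hg5'
      have hmark := mExt_mark (h := h) hG hg1 hg2 hg3 hg4 hg5' hreC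
      have hzlt := zerosN_lt_mark hG hg1 hg2 hg3 hg4 hg5'
      have hIH := IH (pvSet g (r + d.1) (c + d.2) 2) ((r + d.1, c + d.2) :: st) r c
        (fun x hx => hds x (by simp [hx]))
        (goodG_shape hG (shapeEq_pvSet g _ _ 2)) (mExt_trans hE hmark) hre h0r h0c
      obtain ⟨hI1, hI2, hI3, hI4, hI5, hI6⟩ := hIH
      have hunf : pushNbrs g st r c N M (d :: rest) =
          pushNbrs (pvSet g (r + d.1) (c + d.2) 2) ((r + d.1, c + d.2) :: st) r c N M rest := by
        rw [pushNbrs, if_pos ⟨hg1, hg2, hg3, hg4, hg5⟩]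
      rw [hunf]
      have hset2 : cellN (pvSet g (r + d.1) (c + d.2) 2) (r + d.1).toNat (c + d.2).toNat = 2 := by
        have hr' : (r + d.1).toNat < g.length := by have := hG.1; omega
        have hc' : (c + d.2).toNat < (g.getD (r + d.1).toNat []).length := by
          have := hG.2 (r + d.1).toNat (by omega); omega
        exact cellN_pvSet_self g _ _ 2 hr' hc'
      refine ⟨mExt_trans hmark hI1, ?_, ?_, ?_, ?_, by
        simp only [List.length_cons] at hI6; omega⟩
      · intro x hx nr nc hnr hnc hb1 hb2 hb3 hb4
        rcases List.mem_cons.mp hx with rfl | hxr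
        · subst hnr; subst hnc
          intro hzero
          have h2fin : cellN (pushNbrs (pvSet g (r + x.1) (c + x.2) 2)
              ((r + x.1, c + x.2) :: st) r c N M rest).1 (r + x.1).toNat (c + x.2).toNat = 2 :=
            mExt_two hI1 hset2
          rw [h2fin] at hzero
          norm_num at hzero
        · exact hI2 x hxr nr nc hnr hnc hb1 hb2 hb3 hb4
      · exact fun p hp => hI3 p (by simp [hp])
      · intro p hp
        rcases hI4 p hp with hps | hnew
        · rcases List.mem_cons.mp hps with rfl | hpr
          · exact Or.inr ⟨by simpa using hg1, by simpa using hg3, hreC⟩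
          · exact Or.inl hpr
        · exact Or.inr hnew
      · intro i j h2
        rcases hI5 i j h2 with h2S | hmem
        · by_cases hij : i = (r + d.1).toNat ∧ j = (c + d.2).toNat
          · rcases hij with ⟨rfl, rfl⟩
            exact Or.inr ⟨(r + d.1, c + d.2), hI3 _ (by simp), rfl, rfl⟩
          · left
            have : cellN (pvSet g (r + d.1) (c + d.2) 2) i j = cellN g i j := by
              apply cellN_pvSet_ne; tauto
            rw [← this]; exact h2S
        · exact Or.inr hmem
    · have hunf : pushNbrs g st r c N M (d :: rest) = pushNbrs g st r c N M rest := by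
        rw [pushNbrs, if_neg hguard]
      rw [hunf]
      have hIH := IH g st r c (fun x hx => hds x (by simp [hx])) hG hE hre h0r h0c
      obtain ⟨hI1, hI2, hI3, hI4, hI5, hI6⟩ := hIH
      refine ⟨hI1, ?_, hI3, hI4, hI5, hI6⟩
      intro x hx nr nc hnr hnc hb1 hb2 hb3 hb4
      rcases List.mem_cons.mp hx with rfl | hxr
      · push_neg at hguard
        have hnz : cellN g nr.toNat nc.toNat ≠ 0 := by
          have := hguard (hnr ▸ hb1) (hnr ▸ hb2) (hnc ▸ hb3) (hnc ▸ hb4)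
          rw [hnr, hnc]
          exact this
        intro hzero
        exact hnz (by
          by_cases hz2 : cellN g nr.toNat nc.toNat = 0
          · exact hz2
          · exact absurd ((mExt_pres hI1 hz2) ▸ hzero) hz2)
      · exact hI2 x hxr nr nc hnr hnc hb1 hb2 hb3 hb4

lemma bloop_spec {h : List (List Int)} {N M : Int} :
    ∀ (fuel : Nat) (g : List (List Int)) (st : List (Int × Int)),
    5 * zerosN g N M + st.length + 1 ≤ fuel →
    GoodG g N M → MExt h N M h g →
    (∀ p ∈ st, 0 ≤ p.1 ∧ 0 ≤ p.2 ∧ ReachN h N M p.1.toNat p.2.toNat) →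
    (∀ i j, InRN N M i j → cellN g i j = 2 →
      (∃ p ∈ st, p.1.toNat = i ∧ p.2.toNat = j) ∨ NoZ N M g i j) →
    MExt h N M h (bloop fuel g st N M) ∧ SatN (bloop fuel g st N M) N M := by
  intro fuel
  induction fuel with
  | zero => intro g st hfuel; omega
  | succ f IH =>
    intro g st hfuel hG hE hst hsat
    match st with
    | [] =>
      rw [bloop]
      refine ⟨hE, fun i j hin h2 => ?_⟩
      rcases hsat i j hin h2 with ⟨p, hp, _⟩ | hnoz
      · simp at hp
      · exact hnoz
    | p :: rest =>
      obtain ⟨hp1, hp2, hp3⟩ := hst p (by simp)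
      have hdirs : ∀ d ∈ pvDirs, ∃ k, k < 4 ∧ d.1 = pvDr.getD k 0 ∧ d.2 = pvDc.getD k 0 := by
        decide
      obtain ⟨hP1, hP2, hP3, hP4, hP5, hP6⟩ :=
        pushNbrs_spec pvDirs g rest p.1 p.2 hdirs hG hE hp3 hp1 hp2
      rw [bloop]
      apply IH
      · simp only [List.length_cons] at hfuel; omega
      · exact goodG_shape hG hP1.1
      · exact mExt_trans hE hP1
      · intro q hq
        rcases hP4 q hq with hqr | hnew
        · exact hst q (by simp [hqr])
        · exact hnew
      · intro i j hin h2
        rcases hP5 i j h2 with h2g | hmem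
        · rcases hsat i j hin h2g with ⟨q, hq, hqc⟩ | hnozg
          · rcases List.mem_cons.mp hq with rfl | hqr
            · right
              rcases hqc with ⟨rfl, rfl⟩
              apply noZ_of_dead hp1 hp2
              intro k hk nr nc hnr hnc hb1 hb2 hb3 hb4
              have hdmem : ((pvDr.getD k 0, pvDc.getD k 0) : Int × Int) ∈ pvDirs := by
                interval_cases k <;> simp [pvDirs, pvDr, pvDc]
              exact hP2 (pvDr.getD k 0, pvDc.getD k 0) hdmem nr nc hnr hnc hb1 hb2 hb3 hb4
            · exact Or.inl ⟨q, hP3 q hqr, hqc⟩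
          · exact Or.inr (noZ_mono hP1 hnozg)
        · exact Or.inl hmem

-- ---- wall application ----
lemma walls_go {N M : Int} (area : List (List Int)) (hGA : GoodG area N M) :
    ∀ (w : List (Int × Int)) (t : List (List Int)),
    ShapeEq area t →
    (∀ i j, cellN t i j = cellN area i j ∨ (cellN area i j = 0 ∧ cellN t i j = 1)) →
    (∀ p ∈ w, 0 ≤ p.1 ∧ p.1 < N ∧ 0 ≤ p.2 ∧ p.2 < M ∧ cellN area p.1.toNat p.2.toNat = 0) →
    ShapeEq area (w.foldl (fun t p => pvSet t p.1 p.2 1) t) ∧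
    (∀ i j, cellN (w.foldl (fun t p => pvSet t p.1 p.2 1) t) i j = cellN area i j ∨
      (cellN area i j = 0 ∧ cellN (w.foldl (fun t p => pvSet t p.1 p.2 1) t) i j = 1)) := by
  intro w
  induction w with
  | nil => intro t hsh hcell _; exact ⟨hsh, hcell⟩
  | cons p rest IH =>
    intro t hsh hcell hw
    obtain ⟨hw1, hw2, hw3, hw4, hw5⟩ := hw p (by simp)
    have hGt : GoodG t N M := goodG_shape hGA hsh
    have hr' : p.1.toNat < t.length := by have := hGt.1; omega
    have hc' : p.2.toNat < (t.getD p.1.toNat []).length := by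
      have := hGt.2 p.1.toNat (by omega); omega
    simp only [List.foldl_cons]
    apply IH
    · exact shapeEq_trans hsh (shapeEq_pvSet t p.1 p.2 1)
    · intro i j
      by_cases hij : i = p.1.toNat ∧ j = p.2.toNat
      · rcases hij with ⟨rfl, rfl⟩
        exact Or.inr ⟨hw5, cellN_pvSet_self t p.1 p.2 1 hr' hc'⟩
      · rw [cellN_pvSet_ne t p.1 p.2 1 i j (by tauto)]
        exact hcell i j
    · exact fun q hq => hw q (by simp [hq])

-- ---- scoring ----
lemma take_map_count (G : List (List Int)) (n : Nat) (hn : n ≤ G.length) :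
    (List.range n).map (fun k => (PySem.List.count (G.getD k []) 0 : Int)) =
    (G.take n).map (fun row => (PySem.List.count row 0 : Int)) := by
  apply List.ext_getElem (by simp; omega)
  intro k hk1 hk2
  simp only [List.getElem_map, List.getElem_range, List.getElem_take]
  congr 1
  rw [List.getD_eq_getElem _ _ (by simp at hk2; omega)]

lemma score_eq (G : List (List Int)) (N : Int) (h0 : 0 ≤ N) (hlen : N ≤ (G.length : Int)) :
    (PySem.List.pyRange 0 N 1).foldl
      (fun s r => s + (PySem.List.count (G.getD r.toNat []) 0 : Int)) 0 =
    ((G.take N.toNat).map (fun row => (PySem.List.count row 0 : Int))).sum := by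
  obtain ⟨n, rfl⟩ : ∃ n : Nat, N = (n : Int) := ⟨N.toNat, (Int.toNat_of_nonneg h0).symm⟩
  rw [PySem.List.pyRange_zero_natCast n, List.foldl_map,
    PySem.List.foldl_add _ (fun k : Nat => (PySem.List.count (G.getD ((k : Int)).toNat []) 0 : Int)) 0,
    zero_add]
  have hn : n ≤ G.length := by omega
  rw [show ((n : Int)).toNat = n by omega, ← take_map_count G n hn]
  refine congrArg List.sum (List.map_congr_left ?_)
  intro k _
  simp

-- ---- per-candidate equality ----
set_option maxHeartbeats 2000000 in
lemma candidate_eq {N M : Int} (area : List (List Int)) (hG : GoodG area N M) (h0N : 0 ≤ N)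
    (w seeds : List (Int × Int))
    (hw : ∀ p ∈ w, 0 ≤ p.1 ∧ p.1 < N ∧ 0 ≤ p.2 ∧ p.2 < M ∧ cellN area p.1.toNat p.2.toNat = 0)
    (hseeds : ∀ p : Int × Int, p ∈ seeds ↔
      (0 ≤ p.1 ∧ p.1 < N ∧ 0 ≤ p.2 ∧ p.2 < M ∧ cellN area p.1.toNat p.2.toNat = 2)) :
    getArea area w seeds N M = spreadCount area w seeds N M := by
  obtain ⟨hSh, hWc⟩ := walls_go area hG w area ⟨rfl, fun _ => rfl⟩ (fun i j => Or.inl rfl) hw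
  have hGh : GoodG (w.foldl (fun t p => pvSet t p.1 p.2 1) area) N M := goodG_shape hG hSh
  have hcell2 : ∀ i j, cellN (w.foldl (fun t p => pvSet t p.1 p.2 1) area) i j = 2 ↔
      cellN area i j = 2 := by
    intro i j
    rcases hWc i j with h1 | h1
    · rw [h1]
    · constructor
      · intro h2; rw [h1.2] at h2; norm_num at h2
      · intro h2; rw [h1.1] at h2; norm_num at h2
  have hseedR : ∀ p ∈ seeds, 0 ≤ p.1 ∧ 0 ≤ p.2 ∧
      ReachN (w.foldl (fun t p => pvSet t p.1 p.2 1) area) N M p.1.toNat p.2.toNat := by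
    intro p hp
    obtain ⟨h1, h2, h3, h4, h5⟩ := (hseeds p).mp hp
    refine ⟨h1, h3, ReachN.base p.1.toNat p.2.toNat ⟨by omega, by omega⟩ ?_⟩
    exact (hcell2 p.1.toNat p.2.toNat).mpr h5
  have hsatI : ∀ i j, InRN N M i j →
      cellN (w.foldl (fun t p => pvSet t p.1 p.2 1) area) i j = 2 →
      (∃ p ∈ seeds, p.1.toNat = i ∧ p.2.toNat = j) ∨
        NoZ N M (w.foldl (fun t p => pvSet t p.1 p.2 1) area) i j := by
    intro i j hin h2
    left
    refine ⟨((i : Int), (j : Int)), ?_, by simp, by simp⟩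
    rw [hseeds]
    refine ⟨Int.natCast_nonneg i, by simpa using hin.1, Int.natCast_nonneg j, by simpa using hin.2, ?_⟩
    simpa using (hcell2 i j).mp h2
  obtain ⟨hA1, hA2⟩ := infectAll_spec seeds (w.foldl (fun t p => pvSet t p.1 p.2 1) area)
    hGh (mExt_refl _ N M _) hseedR hsatI
  have hfuelB : 5 * zerosN (w.foldl (fun t p => pvSet t p.1 p.2 1) area) N M +
      seeds.reverse.length + 1 ≤ 5 * (N.toNat * M.toNat) + seeds.length + 1 := by
    have := zerosN_le (w.foldl (fun t p => pvSet t p.1 p.2 1) area) N M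
    simp only [List.length_reverse]
    omega
  obtain ⟨hB1, hB2⟩ := bloop_spec (5 * (N.toNat * M.toNat) + seeds.length + 1)
    (w.foldl (fun t p => pvSet t p.1 p.2 1) area) seeds.reverse hfuelB hGh (mExt_refl _ N M _)
    (fun p hp => hseedR p (List.mem_reverse.mp hp))
    (by
      intro i j hin h2
      rcases hsatI i j hin h2 with ⟨p, hp, hpc⟩ | hnoz
      · exact Or.inl ⟨p, List.mem_reverse.mpr hp, hpc⟩
      · exact Or.inr hnoz)
  have hEq : pvInfectAll seeds (w.foldl (fun t p => pvSet t p.1 p.2 1) area) N M =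
      bloop (5 * (N.toNat * M.toNat) + seeds.length + 1)
        (w.foldl (fun t p => pvSet t p.1 p.2 1) area) seeds.reverse N M :=
    grid_unique hA1 hA2 hB1 hB2
  simp only [getArea, spreadCount]
  rw [hEq]
  apply score_eq _ N h0N
  have hsh1 := hB1.1.1
  have hsh2 := hSh.1
  have := hG.1
  omega

-- ---- collection loops ----
lemma collect_inner (area : List (List Int)) (r : Int) (l : List Int)
    (pi : List (Int × Int) × List (Int × Int)) :
    l.foldl (fun pi c =>
        if pvCell area r c = 0 then (pi.1 ++ [(r, c)], pi.2)
        else if pvCell area r c = 2 then (pi.1, pi.2 ++ [(r, c)]) else pi) pi =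
    (pi.1 ++ (l.filter (fun c => pvCell area r c = 0)).map (fun c => ((r, c) : Int × Int)),
     pi.2 ++ (l.filter (fun c => pvCell area r c = 2)).map (fun c => ((r, c) : Int × Int))) := by
  induction l generalizing pi with
  | nil => simp
  | cons x xs ih =>
    simp only [List.foldl_cons, List.filter_cons]
    by_cases h0 : pvCell area r x = 0
    · simp [h0, ih]
    · by_cases h2 : pvCell area r x = 2
      · simp [h0, h2, ih]
      · simp [h0, h2, ih]

lemma foldl_pair_append {α : Type} (f g : α → List (Int × Int)) (l : List α)
    (pi : List (Int × Int) × List (Int × Int)) :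
    l.foldl (fun pi x => (pi.1 ++ f x, pi.2 ++ g x)) pi = (pi.1 ++ l.flatMap f, pi.2 ++ l.flatMap g) := by
  induction l generalizing pi with
  | nil => simp
  | cons x xs ih => simp [ih, List.append_assoc]

lemma collect_outer (area : List (List Int)) (M : Int) (rows : List Int)
    (pi : List (Int × Int) × List (Int × Int)) :
    rows.foldl (fun pi r =>
      (PySem.List.pyRange 0 M 1).foldl
        (fun (pi : List (Int × Int) × List (Int × Int)) c =>
          if pvCell area r c = 0 then (pi.1 ++ [(r, c)], pi.2)
          else if pvCell area r c = 2 then (pi.1, pi.2 ++ [(r, c)]) else pi) pi) pi =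
    (pi.1 ++ rows.flatMap (fun r =>
        ((PySem.List.pyRange 0 M 1).filter (fun c => pvCell area r c = 0)).map
          (fun c => ((r, c) : Int × Int))),
     pi.2 ++ rows.flatMap (fun r =>
        ((PySem.List.pyRange 0 M 1).filter (fun c => pvCell area r c = 2)).map
          (fun c => ((r, c) : Int × Int)))) := by
  simp only [collect_inner]
  rw [foldl_pair_append]

lemma mem_collect (area : List (List Int)) (N M : Int) (v : Int) (p : Int × Int) :
    (p ∈ (PySem.List.pyRange 0 N 1).flatMap (fun r =>
        ((PySem.List.pyRange 0 M 1).filter (fun c => pvCell area r c = v)).map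
          (fun c => ((r, c) : Int × Int)))) ↔
    (0 ≤ p.1 ∧ p.1 < N ∧ 0 ≤ p.2 ∧ p.2 < M ∧ cellN area p.1.toNat p.2.toNat = v) := by
  simp only [List.mem_flatMap, List.mem_map, List.mem_filter, PySem.List.mem_pyRange_one,
    decide_eq_true_eq]
  constructor
  · rintro ⟨r, ⟨hr0, hrN⟩, c, ⟨⟨hc0, hcM⟩, hv⟩, rfl⟩
    exact ⟨hr0, hrN, hc0, hcM, hv⟩
  · rintro ⟨h1, h2, h3, h4, h5⟩
    exact ⟨p.1, ⟨h1, h2⟩, p.2, ⟨⟨h3, h4⟩, h5⟩, rfl⟩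

-- ===== VERDICT (by name: the statement is the Claim_ definition above) =====
theorem solution_spec : Claim_equal_solution := by
  unfold Claim_equal_solution
  intro area N M _ hpre
  unfold Spec_solution
  simp only [solution, solution_alt]
  rw [collect_outer area M (PySem.List.pyRange 0 N 1) (([], []) : _)]
  simp only [List.nil_append]
  apply PySem.List.foldl_congr_mem
  intro acc w hwmem
  obtain ⟨hsub, hlen3⟩ := (PySem.List.mem_combinations_iff _ _ _).mp hwmem
  have hmemE : ∀ p ∈ w, p ∈ (PySem.List.pyRange 0 N 1).flatMap (fun r =>
      ((PySem.List.pyRange 0 M 1).filter (fun c => pvCell area r c = 0)).map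
        (fun c => ((r, c) : Int × Int))) := fun p hp => hsub.mem hp
  obtain ⟨p0, hp0⟩ : ∃ p, p ∈ w := by
    cases w with
    | nil => simp at hlen3
    | cons a _ => exact ⟨a, by simp⟩
  have hp0c := (mem_collect area N M 0 p0).mp (hmemE p0 hp0)
  have hN : 0 < N := lt_of_le_of_lt hp0c.1 hp0c.2.1
  have hM : 0 < M := lt_of_le_of_lt hp0c.2.2.1 hp0c.2.2.2.1
  have hG : GoodG area N M := by
    rcases hpre with hc | hc | hc
    · omega
    · omega
    · refine ⟨hc.1, fun i hi => ?_⟩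
      have hil : i < area.length := by have := hc.1; omega
      have hrow : area[i] ∈ area.take N.toNat := by
        rw [List.mem_take_iff_getElem]
        exact ⟨i, by omega, rfl⟩
      have := hc.2 _ hrow
      rwa [List.getD_eq_getElem _ _ hil]
  rw [candidate_eq area hG (le_of_lt hN) w _
    (fun p hp => (mem_collect area N M 0 p).mp (hmemE p hp))
    (fun p => mem_collect area N M 2 p)]
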